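-- pv_equiv track=rewrite | github.com/KanoMahoroSuki/Testing-Preparation | 020密码验证.py | is_secure
-- ===== SOURCE A (Python) =====
-- import string
--
-- def is_secure(password):
--     if len(password) <= 8:
--         return False
--
--     cat_count = 0
--     for char in password:
--         if char.isupper():
--             cat_count += 1
--             break
--
--     for char in password:
--         if char.islower():
--             cat_count += 1
--             break
--
--     for char in password:
--         if char.isdigit():
--             cat_count += 1
--             break
--
--     for char in password:
--         if char in string.punctuation:
--             cat_count += 1
--             break
--
--     if cat_count < 3:
--         return False
--
--     for i in range(len(password) - 2):
--         if password.count(password[i: i + 3]) >= 2: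
--             return False
--     return True
-- ===== SOURCE B (Python) =====
-- import string
--
-- def is_secure(password):
--     if len(password) <= 8:
--         return False
--     has_upper = has_lower = has_digit = has_punct = False
--     for ch in password:
--         if ch.isupper():
--             has_upper = True
--         if ch.islower():
--             has_lower = True
--         if ch.isdigit():
--             has_digit = True
--         if ch in string.punctuation:
--             has_punct = True
--     if has_upper + has_lower + has_digit + has_punct < 3:
--         return False
--     first = {}
--     for i in range(len(password) - 2):
--         t = password[i:i + 3]
--         if t in first:
--             if i - first[t] >= 3:
--                 return False
--         else:
--             first[t] = i
--     return True
-- ===== Notes on version B (the rewrite author's own statement) =====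
-- stated objective: alternative
-- what changed: Replaced A's four separate break-out category scans by one pass with four flags, and replaced the loop that recounts each 3-gram over the whole string by a single pass keeping a dict of each trigram's first index and failing when an equal trigram recurs at distance >= 3 (exactly when Python's non-overlapping count reaches 2).
import Mathlib
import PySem

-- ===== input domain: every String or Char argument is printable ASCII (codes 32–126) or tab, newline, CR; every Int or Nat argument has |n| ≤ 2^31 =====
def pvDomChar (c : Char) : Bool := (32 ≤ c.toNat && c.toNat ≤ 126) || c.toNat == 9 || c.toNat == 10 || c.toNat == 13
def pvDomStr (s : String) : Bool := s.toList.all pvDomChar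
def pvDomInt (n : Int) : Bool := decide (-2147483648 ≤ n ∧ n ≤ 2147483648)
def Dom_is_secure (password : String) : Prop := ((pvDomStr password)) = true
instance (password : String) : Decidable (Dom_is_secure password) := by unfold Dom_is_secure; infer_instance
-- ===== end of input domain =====

-- B merges A's four break-out category scans into one pass with four flags and replaces the
-- per-index whole-string 3-gram recount by one pass with a dict of first occurrences (alternative decomposition).

-- string.punctuation, as the list of its 32 ASCII characters (exact)
def pvPunct : List Char := "!\"#$%&'()*+,-./:;<=>?@[\\]^_`{|}~".toList

-- ===== PORT A =====
-- one 'for char in password: if p(char): cat_count += 1; break' loop (the break makes it add 0 or 1)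
def pvScanCat (p : Char → Bool) : List Char → Int
  | [] => 0
  | c :: rest => if p c then 1 else pvScanCat p rest

-- 'for i in range(len(password)-2): if password.count(password[i:i+3]) >= 2: return False'
def pvCheckRepeats (s : List Char) : List Int → Bool
  | [] => true
  | i :: rest =>
      if 2 ≤ PySem.Chars.count s (PySem.List.slice s (some i) (some (i + 3))) then false
      else pvCheckRepeats s rest

def is_secure (password : String) : Bool :=
  if PySem.Str.len password ≤ 8 then false
  else
    let s := password.toList
    let cat : Int := pvScanCat PySem.Chars.isupper s + pvScanCat PySem.Chars.islower s
                     + pvScanCat PySem.Chars.isdigit s + pvScanCat (fun c => pvPunct.contains c) s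
    if cat < 3 then false
    else pvCheckRepeats s (PySem.List.pyRange 0 (PySem.Str.len password - 2))

-- ===== PORT B =====
-- single pass over the characters accumulating the four category flags
def pvFlagsLoop : List Char → Bool → Bool → Bool → Bool → Bool × Bool × Bool × Bool
  | [], u, l, d, p => (u, l, d, p)
  | c :: rest, u, l, d, p =>
      pvFlagsLoop rest
        (if PySem.Chars.isupper c then true else u)
        (if PySem.Chars.islower c then true else l)
        (if PySem.Chars.isdigit c then true else d)
        (if pvPunct.contains c then true else p)

-- single pass over the trigram start indices with a dict 'first index of this trigram'
def pvScanTri (s : List Char) : List Int → PySem.Dict (List Char) Int → Bool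
  | [], _ => true
  | i :: rest, first =>
      let t := PySem.List.slice s (some i) (some (i + 3))
      match first.get? t with
      | some f => if 3 ≤ i - f then false else pvScanTri s rest first
      | none => pvScanTri s rest (first.insert t i)

def is_secure_alt (password : String) : Bool :=
  if PySem.Str.len password ≤ 8 then false
  else
    let s := password.toList
    let fl := pvFlagsLoop s false false false false
    if ((if fl.1 then (1:Int) else 0) + (if fl.2.1 then 1 else 0)
        + (if fl.2.2.1 then 1 else 0) + (if fl.2.2.2 then 1 else 0)) < 3 then false
    else pvScanTri s (PySem.List.pyRange 0 (PySem.Str.len password - 2)) (PySem.Dict.mk [])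

-- ===== PRECONDITION & SPEC =====
def Spec_is_secure (password : String) (out : Bool) : Prop := out = is_secure_alt password
instance (password : String) (out : Bool) : Decidable (Spec_is_secure password out) := by unfold Spec_is_secure; infer_instance

-- ===== CLAIM (what is proved, stated in full; the proofs are below) =====
def Claim_equal_is_secure : Prop := ∀ (password : String), Dom_is_secure password → Spec_is_secure password (is_secure password)

-- ===== LEMMAS AND PROOFS =====

-- Category scans: each of A's break-loops is an indicator of 'any character satisfies p'
theorem pvScanCat_eq (p : Char → Bool) (s : List Char) :
    pvScanCat p s = if s.any p then 1 else 0 := by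
  induction s with
  | nil => simp [pvScanCat]
  | cons c rest ih =>
      simp only [pvScanCat, List.any_cons]
      by_cases h : p c = true <;> simp [h, ih]

-- B's one-pass flag loop accumulates the same four 'any' indicators
theorem pvFlagsLoop_eq (s : List Char) (u l d p : Bool) :
    pvFlagsLoop s u l d p =
      (u || s.any PySem.Chars.isupper, l || s.any PySem.Chars.islower,
       d || s.any PySem.Chars.isdigit, p || s.any (fun c => pvPunct.contains c)) := by
  induction s generalizing u l d p with
  | nil => simp [pvFlagsLoop]
  | cons c rest ih =>
      simp only [pvFlagsLoop, List.any_cons, ih]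
      cases PySem.Chars.isupper c <;> cases PySem.Chars.islower c <;>
        cases PySem.Chars.isdigit c <;> cases pvPunct.contains c <;> simp

-- Fuel-free model of PySem.Chars.count.go (Python's non-overlapping greedy substring count)
def pvGreedy (sub : List Char) : List Char → Nat
  | [] => 0
  | c :: t => if sub.isPrefixOf (c :: t) then pvGreedy sub ((c :: t).drop (max 1 sub.length)) + 1 else pvGreedy sub t
termination_by l => l.length
decreasing_by
  · simp only [List.length_drop, List.length_cons]; omega
  · simp

theorem pvGo_eq (sub : List Char) (hs : sub ≠ []) :
    ∀ (fuel : Nat) (l : List Char) (acc : Nat), l.length ≤ fuel →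
      PySem.Chars.count.go sub fuel l acc = acc + pvGreedy sub l := by
  intro fuel
  induction fuel with
  | zero =>
      intro l acc hl
      have : l = [] := List.eq_nil_of_length_eq_zero (by omega)
      subst this
      simp [PySem.Chars.count.go, pvGreedy]
  | succ n ih =>
      intro l acc hl
      cases l with
      | nil => simp [PySem.Chars.count.go, pvGreedy]
      | cons c t =>
          rw [pvGreedy]
          by_cases hp : sub.isPrefixOf (c :: t) = true
          · have hk : 1 ≤ sub.length := by
              cases sub with | nil => simp at hs | cons a b => simp
            have hmax : max 1 sub.length = sub.length := by omega
            simp only [PySem.Chars.count.go, hp, if_true, hmax]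
            rw [ih ((c :: t).drop sub.length) (acc + 1) (by simp [List.length_drop]; simp at hl; omega)]
            omega
          · simp only [PySem.Chars.count.go, hp]
            rw [ih t acc (by simp at hl ⊢; omega)]
            simp

theorem pvCount_eq (s sub : List Char) (hs : sub ≠ []) :
    PySem.Chars.count s sub = pvGreedy sub s := by
  have : sub.isEmpty = false := by simp [hs]
  simp [PySem.Chars.count, this]
  simpa using pvGo_eq sub hs s.length s 0 le_rfl

theorem pvGreedy_ge1 (sub : List Char) (hs : sub ≠ []) (l : List Char) :
    1 ≤ pvGreedy sub l ↔ ∃ j, sub <+: l.drop j := by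
  induction l using pvGreedy.induct sub with
  | case1 =>
      simp [pvGreedy, List.drop_nil, List.prefix_nil, hs]
  | case2 c t hp ih =>
      rw [pvGreedy, if_pos hp]
      simp only [Nat.le_add_left, true_iff]
      exact ⟨0, by simpa using List.isPrefixOf_iff_prefix.mp hp⟩
  | case3 c t hp ih =>
      rw [pvGreedy, if_neg hp, ih]
      constructor
      · rintro ⟨j, hj⟩; exact ⟨j + 1, by simpa using hj⟩
      · rintro ⟨j, hj⟩
        cases j with
        | zero =>
            exact absurd (List.isPrefixOf_iff_prefix.mpr (by simpa using hj)) (by simpa using hp)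
        | succ m => exact ⟨m, by simpa using hj⟩

-- greedy count reaches 2 exactly when the pattern occurs at two starts ≥ |sub| apart
theorem pvGreedy_ge2 (sub : List Char) (hs : sub ≠ []) (l : List Char) :
    2 ≤ pvGreedy sub l ↔
      ∃ p q, p + sub.length ≤ q ∧ sub <+: l.drop p ∧ sub <+: l.drop q := by
  have hk : 1 ≤ sub.length := by cases sub with | nil => simp at hs | cons a b => simp
  have hmax : max 1 sub.length = sub.length := by omega
  induction l using pvGreedy.induct sub with
  | case1 =>
      simp [pvGreedy, List.drop_nil, List.prefix_nil, hs]
  | case2 c t hp ih =>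
      rw [pvGreedy, if_pos hp, hmax]
      have h1 := pvGreedy_ge1 sub hs ((c :: t).drop sub.length)
      constructor
      · intro h2
        obtain ⟨j, hj⟩ := h1.mp (by omega)
        refine ⟨0, sub.length + j, by omega, by simpa using List.isPrefixOf_iff_prefix.mp hp, ?_⟩
        rwa [List.drop_drop] at hj
      · rintro ⟨p, q, hpq, _, hq⟩
        have hqk : sub.length ≤ q := by omega
        have : sub <+: ((c :: t).drop sub.length).drop (q - sub.length) := by
          rw [List.drop_drop]
          have e : sub.length + (q - sub.length) = q := by omega
          rwa [e]
        have := h1.mpr ⟨q - sub.length, this⟩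
        omega
  | case3 c t hp ih =>
      rw [pvGreedy, if_neg hp]
      refine ih.trans ?_
      constructor
      · rintro ⟨p, q, hpq, hp', hq'⟩
        exact ⟨p + 1, q + 1, by omega, by simpa using hp', by simpa using hq'⟩
      · rintro ⟨p, q, hpq, hp', hq'⟩
        cases p with
        | zero =>
            exact absurd (List.isPrefixOf_iff_prefix.mpr (by simpa using hp')) (by simpa using hp)
        | succ m =>
            cases q with
            | zero => omega
            | succ r => exact ⟨m, r, by omega, by simpa using hp', by simpa using hq'⟩

-- the common characterisation both repeat loops are proved against
def pvTri (s : List Char) (j : Nat) : List Char := (s.drop j).take 3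
def pvHasRep (s : List Char) : Prop := ∃ p q, p + 3 ≤ q ∧ q + 3 ≤ s.length ∧ pvTri s p = pvTri s q

theorem pvSlice_tri (s : List Char) (a : Nat) :
    PySem.List.slice s (some (a:Int)) (some ((a:Int) + 3)) = pvTri s a := by
  have : ((a:Int) + 3) = ((a + 3 : Nat) : Int) := by push_cast; ring
  rw [this, PySem.List.slice_natCast]
  simp [pvTri]

theorem pvTri_len (s : List Char) (a : Nat) (h : a + 3 ≤ s.length) : (pvTri s a).length = 3 := by
  simp [pvTri, List.length_take, List.length_drop]; omega

theorem pvTri_prefix (s : List Char) (a : Nat) : pvTri s a <+: s.drop a := List.take_prefix _ _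

-- a list of length 3 is a prefix of s.drop j exactly when it IS the trigram at j (and fits)
theorem pvOcc_iff (s : List Char) (t : List Char) (ht : t.length = 3) (j : Nat) :
    t <+: s.drop j ↔ j + 3 ≤ s.length ∧ pvTri s j = t := by
  constructor
  · intro h
    have hl := List.IsPrefix.length_le h
    simp [List.length_drop, ht] at hl
    refine ⟨by omega, ?_⟩
    have h2 := List.prefix_iff_eq_take.mp h
    rw [ht] at h2
    exact h2.symm
  · rintro ⟨hj, rfl⟩
    exact pvTri_prefix s j

theorem pvCheckRepeats_all (s : List Char) (idxs : List Int) :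
    pvCheckRepeats s idxs = true ↔
      ∀ i ∈ idxs, ¬ 2 ≤ PySem.Chars.count s (PySem.List.slice s (some i) (some (i + 3))) := by
  induction idxs with
  | nil => simp [pvCheckRepeats]
  | cons i rest ih =>
      rw [pvCheckRepeats]
      by_cases h : 2 ≤ PySem.Chars.count s (PySem.List.slice s (some i) (some (i + 3)))
      · simp only [h, if_true]
        constructor
        · intro hF; exact absurd hF (by simp)
        · intro hall; exact absurd (hall i (by simp)) (by simpa using h)
      · simp only [h, if_false, ih]
        constructor
        · intro hall j hj
          rcases List.mem_cons.mp hj with rfl | hj'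
          · exact h
          · exact hall j hj'
        · intro hall j hj; exact hall j (List.mem_cons_of_mem _ hj)

-- A's repeat loop fails exactly on strings with two equal trigrams ≥ 3 apart
theorem pvCheck_iff (s : List Char) :
    pvCheckRepeats s (PySem.List.pyRange 0 ((s.length : Int) - 2)) = true ↔ ¬ pvHasRep s := by
  rw [pvCheckRepeats_all]
  constructor
  · intro hall hrep
    obtain ⟨p, q, hpq, hqn, heq⟩ := hrep
    have hmem : (p : Int) ∈ PySem.List.pyRange 0 ((s.length : Int) - 2) := by
      rw [PySem.List.mem_pyRange_one]
      constructor
      · positivity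
      · omega
    apply hall _ hmem
    rw [pvSlice_tri]
    have hpl : p + 3 ≤ s.length := by omega
    have ht3 : (pvTri s p).length = 3 := pvTri_len s p hpl
    have hne : pvTri s p ≠ [] := by intro h; rw [h] at ht3; simp at ht3
    rw [pvCount_eq s _ hne, pvGreedy_ge2 _ hne]
    refine ⟨p, q, by omega, pvTri_prefix s p, ?_⟩
    rw [(pvOcc_iff s (pvTri s p) ht3 q)]
    exact ⟨hqn, heq.symm⟩
  · intro hnrep i hmem
    rw [PySem.List.mem_pyRange_one] at hmem
    obtain ⟨h0, hlt⟩ := hmem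
    obtain ⟨a, rfl⟩ : ∃ a : Nat, i = (a : Int) := ⟨i.toNat, (Int.toNat_of_nonneg h0).symm⟩
    have ha : a + 3 ≤ s.length := by omega
    rw [pvSlice_tri]
    have ht3 : (pvTri s a).length = 3 := pvTri_len s a ha
    have hne : pvTri s a ≠ [] := by intro h; rw [h] at ht3; simp at ht3
    rw [pvCount_eq s _ hne, pvGreedy_ge2 _ hne]
    rintro ⟨p, q, hpq, hp', hq'⟩
    rw [pvOcc_iff s _ ht3] at hp' hq'
    exact hnrep ⟨p, q, by omega, hq'.1, hp'.2.trans hq'.2.symm⟩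

-- B's dict loop: invariant 'the dict maps every trigram seen so far to its first index'
theorem pvScanTri_spec (s : List Char) (m : Nat) :
    ∀ (k a : Nat) (d : PySem.Dict (List Char) Int), m - a = k → a ≤ m →
    (∀ t f, d.get? t = some f → ∃ j : Nat, f = (j:Int) ∧ j < a ∧ pvTri s j = t ∧ ∀ j' < a, pvTri s j' = t → j ≤ j') →
    (∀ j, j < a → (d.get? (pvTri s j)).isSome = true) →
    (pvScanTri s (PySem.List.pyRange (a:Int) ((m:Int))) d = true ↔
      ¬ ∃ p q, p + 3 ≤ q ∧ a ≤ q ∧ q < m ∧ pvTri s p = pvTri s q) := by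
  intro k
  induction k with
  | zero =>
      intro a d hk ham h1 h2
      have : a = m := by omega
      subst this
      rw [PySem.List.pyRange_one_eq_nil (by omega)]
      simp only [pvScanTri, true_iff]
      rintro ⟨p, q, _, haq, hqm, _⟩
      omega
  | succ k ih =>
      intro a d hk ham h1 h2
      have halt : a < m := by omega
      rw [PySem.List.pyRange_one_cons (by exact_mod_cast halt)]
      have hcast : ((a:Int) + 1) = ((a + 1 : Nat) : Int) := by push_cast; ring
      rw [pvScanTri, pvSlice_tri]
      cases hget : d.get? (pvTri s a) with
      | some f =>
          obtain ⟨j, rfl, hja, htj, hmin⟩ := h1 _ _ hget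
          show (if 3 ≤ (a:Int) - (j:Int) then false
                else pvScanTri s (PySem.List.pyRange ((a:Int) + 1) ((m:Int))) d) = true ↔ _
          by_cases htrig : 3 ≤ (a:Int) - (j:Int)
          · rw [if_pos htrig]
            exact iff_of_false (by simp) (not_not_intro ⟨j, a, by omega, le_rfl, halt, htj⟩)
          · rw [if_neg htrig]
            rw [hcast]
            rw [ih (a+1) d (by omega) (by omega) ?h1 ?h2]
            case h1 =>
              intro t f hf
              obtain ⟨j', rfl, hj', ht', hmin'⟩ := h1 _ _ hf
              refine ⟨j', rfl, by omega, ht', ?_⟩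
              intro j'' hj'' ht''
              by_cases hja'' : j'' < a
              · exact hmin' j'' hja'' ht''
              · have : j'' = a := by omega
                subst this
                rw [ht''] at hget
                rw [hget] at hf
                have hji : (j : Int) = (j' : Int) := by injection hf
                have : j' = j := by exact_mod_cast hji.symm
                omega
            case h2 =>
              intro j' hj'
              by_cases hja' : j' < a
              · exact h2 j' hja'
              · have : j' = a := by omega
                subst this
                rw [hget]; rfl
            constructor
            · intro hno
              rintro ⟨p, q, hpq, haq, hqm, heq⟩
              by_cases hqa : q = a
              · subst hqa
                have := hmin p (by omega) heq
                omega
              · exact hno ⟨p, q, hpq, by omega, hqm, heq⟩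
            · intro hno
              rintro ⟨p, q, hpq, haq, hqm, heq⟩
              exact hno ⟨p, q, hpq, by omega, hqm, heq⟩
      | none =>
          have hfresh : ∀ j, j < a → pvTri s j ≠ pvTri s a := by
            intro j hj heq
            have := h2 j hj
            rw [heq, hget] at this
            simp at this
          show pvScanTri s (PySem.List.pyRange ((a:Int) + 1) ((m:Int))) (d.insert (pvTri s a) ((a:Int))) = true ↔ _
          rw [hcast]
          rw [ih (a+1) (d.insert (pvTri s a) (a:Int)) (by omega) (by omega) ?h1 ?h2]
          case h1 =>
            intro t f hf
            by_cases ht : t = pvTri s a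
            · subst ht
              rw [PySem.Dict.get?_insert_self] at hf
              have : f = (a : Int) := by injection hf; omega
              subst this
              refine ⟨a, rfl, by omega, rfl, ?_⟩
              intro j'' hj'' ht''
              by_cases h : j'' < a
              · exact absurd ht'' (hfresh j'' h)
              · omega
            · rw [PySem.Dict.get?_insert_of_ne d _ ht] at hf
              obtain ⟨j', rfl, hj', ht', hmin'⟩ := h1 _ _ hf
              refine ⟨j', rfl, by omega, ht', ?_⟩
              intro j'' hj'' ht''
              by_cases h : j'' < a
              · exact hmin' j'' h ht''
              · have : j'' = a := by omega
                subst this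
                exact absurd ht''.symm ht
          case h2 =>
            intro j' hj'
            by_cases h : j' < a
            · by_cases ht : pvTri s j' = pvTri s a
              · rw [ht, PySem.Dict.get?_insert_self]; rfl
              · rw [PySem.Dict.get?_insert_of_ne d _ ht]
                exact h2 j' h
            · have : j' = a := by omega
              subst this
              rw [PySem.Dict.get?_insert_self]; rfl
          constructor
          · intro hno
            rintro ⟨p, q, hpq, haq, hqm, heq⟩
            by_cases hqa : q = a
            · subst hqa
              exact hfresh p (by omega) heq
            · exact hno ⟨p, q, hpq, by omega, hqm, heq⟩
          · intro hno
            rintro ⟨p, q, hpq, haq, hqm, heq⟩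
            exact hno ⟨p, q, hpq, by omega, hqm, heq⟩

-- B's repeat loop as a whole agrees with the same characterisation
theorem pvScan_iff (s : List Char) (hn : 9 ≤ s.length) :
    pvScanTri s (PySem.List.pyRange 0 ((s.length : Int) - 2)) (PySem.Dict.mk []) = true ↔ ¬ pvHasRep s := by
  have hm : ((s.length : Int) - 2) = ((s.length - 2 : Nat) : Int) := by omega
  have h0 : ((0 : Nat) : Int) = (0 : Int) := rfl
  rw [hm, ← h0]
  rw [pvScanTri_spec s (s.length - 2) (s.length - 2) 0 (PySem.Dict.mk []) (by omega) (by omega)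
      (by intro t f hf; simp [PySem.Dict.get?] at hf) (by intro j hj; omega)]
  constructor
  · rintro hno ⟨p, q, hpq, hqn, heq⟩
    exact hno ⟨p, q, hpq, by omega, by omega, heq⟩
  · rintro hno ⟨p, q, hpq, _, hqm, heq⟩
    exact hno ⟨p, q, hpq, by omega, heq⟩

theorem pv_main (password : String) : is_secure password = is_secure_alt password := by
  unfold is_secure is_secure_alt
  simp only [PySem.Str.len_eq, pvScanCat_eq, pvFlagsLoop_eq, Bool.false_or]
  by_cases hlen : ((password.toList.length : Int)) ≤ 8
  · rw [if_pos hlen, if_pos hlen]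
  · rw [if_neg hlen, if_neg hlen]
    have hn : 9 ≤ password.toList.length := by omega
    by_cases hcat : ((if password.toList.any PySem.Chars.isupper then (1:Int) else 0)
        + (if password.toList.any PySem.Chars.islower then 1 else 0)
        + (if password.toList.any PySem.Chars.isdigit then 1 else 0)
        + (if password.toList.any (fun c => pvPunct.contains c) then 1 else 0)) < 3
    · rw [if_pos hcat, if_pos hcat]
    · rw [if_neg hcat, if_neg hcat]
      exact Bool.eq_iff_iff.mpr
        ((pvCheck_iff password.toList).trans (pvScan_iff password.toList hn).symm)

-- ===== VERDICT (by name: the statement is the Claim_ definition above) =====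
theorem is_secure_spec : Claim_equal_is_secure := by
  intro password _
  unfold Spec_is_secure
  exact pv_main password
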